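-- pv_equiv track=rewrite | github.com/AgustinCB/contests | tuenti2021/problem12.py | get_btcs
-- ===== SOURCE A (Python) =====
-- from typing import Dict, List
--
-- def get_btcs(transactions: Dict[str, Dict[str, int]], prev: Dict[str, str]):
--     if "END_BTC" not in prev:
--         return 1
--     current = "END_BTC"
--     coins = 1
--     path = []
--     while current != "START_BTC":
--         path.append(current)
--         current = prev[current]
--
--     for p in reversed(path):
--         coins *= transactions[current][p]
--         current = p
--     return coins if coins > 1 else 1
-- ===== SOURCE B (Python) =====
-- def get_btcs(transactions, prev):
--     if "END_BTC" not in prev: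
--         return 1
--     coins = 1
--     current = "END_BTC"
--     while current != "START_BTC":
--         p = prev[current]
--         coins *= transactions[p][current]
--         current = p
--     return coins if coins > 1 else 1
-- ===== Notes on version B (the rewrite author's own statement) =====
-- stated objective: simpler
-- what changed: Single backward pass that multiplies edge weights while walking prev-links, eliminating the explicit path list and the second reversed loop (correct by commutativity of integer multiplication).
import Mathlib
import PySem

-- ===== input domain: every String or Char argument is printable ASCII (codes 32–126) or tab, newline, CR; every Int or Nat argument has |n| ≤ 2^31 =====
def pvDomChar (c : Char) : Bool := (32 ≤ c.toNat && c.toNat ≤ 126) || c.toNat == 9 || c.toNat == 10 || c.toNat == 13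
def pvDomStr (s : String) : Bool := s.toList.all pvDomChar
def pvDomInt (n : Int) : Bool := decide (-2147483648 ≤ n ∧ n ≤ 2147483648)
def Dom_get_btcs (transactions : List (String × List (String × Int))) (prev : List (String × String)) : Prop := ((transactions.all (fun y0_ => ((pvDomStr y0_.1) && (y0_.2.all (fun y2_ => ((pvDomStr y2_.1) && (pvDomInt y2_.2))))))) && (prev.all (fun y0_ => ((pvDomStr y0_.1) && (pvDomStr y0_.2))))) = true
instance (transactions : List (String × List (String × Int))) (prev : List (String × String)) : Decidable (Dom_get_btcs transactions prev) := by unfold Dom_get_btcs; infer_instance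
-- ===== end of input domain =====

-- B replaces A's two passes (collect the path, then multiply forward over reversed(path))
-- by one backward pass that multiplies while walking the prev-links (simpler; same values by
-- commutativity of integer multiplication).

-- shared input views: the two Python dicts as PySem.Dicts
def pvPd (prev : List (String × String)) : PySem.Dict String String := PySem.Dict.ofList prev
def pvTd (transactions : List (String × List (String × Int))) : PySem.Dict String (PySem.Dict String Int) :=
  PySem.Dict.ofList (transactions.map (fun p => (p.1, PySem.Dict.ofList p.2)))
-- transactions[a][b] (none = KeyError)
def pvLook2 (td : PySem.Dict String (PySem.Dict String Int)) (a b : String) : Option Int :=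
  (td.get? a).bind (fun d => d.get? b)

-- ===== PORT A =====
-- A's first while loop: collect the path from current to "START_BTC"; none = KeyError or fuel
-- exhausted (in Python: a cycle, i.e. divergence) — both outside Pre_.
def pvBuildPath (pd : PySem.Dict String String) : Nat → String → Option (List String)
  | 0, _ => none
  | fuel+1, current =>
    if current == "START_BTC" then some []
    else match pd.get? current with
      | none => none
      | some nxt => (pvBuildPath pd fuel nxt).map (fun rest => current :: rest)

def get_btcs (transactions : List (String × List (String × Int))) (prev : List (String × String)) : Int :=
  if !(pvPd prev).contains "END_BTC" then 1
  else
    match pvBuildPath (pvPd prev) (prev.length + 1) "END_BTC" with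
    | none => 1  -- Python raises KeyError or diverges here; excluded by Pre_
    | some path =>
      -- second loop: for p in reversed(path): coins *= transactions[current][p]; current = p
      let r := path.reverse.foldl
        (fun (s : Int × String) p => (s.1 * (pvLook2 (pvTd transactions) s.2 p).getD 0, p))
        (1, "START_BTC")
      if r.1 > 1 then r.1 else 1

-- ===== PORT B =====
-- B's single while loop: walk backwards multiplying coins; none = KeyError / cycle (outside Pre_).
def pvWalkBack (td : PySem.Dict String (PySem.Dict String Int)) (pd : PySem.Dict String String) :
    Nat → String → Int → Option Int
  | 0, _, _ => none
  | fuel+1, current, coins =>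
    if current == "START_BTC" then some coins
    else match pd.get? current with
      | none => none
      | some p =>
        match pvLook2 td p current with
        | none => none
        | some w => pvWalkBack td pd fuel p (coins * w)

def get_btcs_alt (transactions : List (String × List (String × Int))) (prev : List (String × String)) : Int :=
  if !(pvPd prev).contains "END_BTC" then 1
  else
    match pvWalkBack (pvTd transactions) (pvPd prev) (prev.length + 1) "END_BTC" 1 with
    | none => 1
    | some coins => if coins > 1 then coins else 1

-- ===== PRECONDITION & SPEC =====
-- checker (NOT either port: it computes no coins): the prev-chain from `current` reaches
-- "START_BTC" within `fuel` steps with every prev/transactions lookup present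
def pvChainOk (td : PySem.Dict String (PySem.Dict String Int)) (pd : PySem.Dict String String) :
    Nat → String → Bool
  | 0, _ => false
  | fuel+1, current =>
    current == "START_BTC" ||
      (match pd.get? current with
       | none => false
       | some p => (pvLook2 td p current).isSome && pvChainOk td pd fuel p)

-- Pre_: when "END_BTC" is a key of prev, the chain must reach "START_BTC" without a missing
-- prev/transactions key (KeyError) and without a cycle (divergence); prev.length + 1 steps is
-- enough for any terminating run since the visited keys are distinct keys of prev.
def Pre_get_btcs (transactions : List (String × List (String × Int))) (prev : List (String × String)) : Prop :=
  (pvPd prev).contains "END_BTC" = true →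
    pvChainOk (pvTd transactions) (pvPd prev) (prev.length + 1) "END_BTC" = true
instance (transactions : List (String × List (String × Int))) (prev : List (String × String)) : Decidable (Pre_get_btcs transactions prev) := by unfold Pre_get_btcs; infer_instance

def pvWitness_get_btcs : (List (String × List (String × Int))) × (List (String × String)) :=
  ([("START_BTC", [("END_BTC", 3)])], [("END_BTC", "START_BTC")])

def Spec_get_btcs (transactions : List (String × List (String × Int))) (prev : List (String × String)) (out : Int) : Prop := out = get_btcs_alt transactions prev
instance (transactions : List (String × List (String × Int))) (prev : List (String × String)) (out : Int) : Decidable (Spec_get_btcs transactions prev out) := by unfold Spec_get_btcs; infer_instance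

-- ===== CLAIM (what is proved, stated in full; the proofs are below) =====
def Claim_equal_get_btcs : Prop := ∀ (transactions : List (String × List (String × Int))) (prev : List (String × String)), Dom_get_btcs transactions prev → Pre_get_btcs transactions prev → Spec_get_btcs transactions prev (get_btcs transactions prev)

-- ===== LEMMAS AND PROOFS =====
-- product of the edge weights transactions[prev[x]][x] over the nodes x of a path
def pvProd (td : PySem.Dict String (PySem.Dict String Int)) (pd : PySem.Dict String String) :
    List String → Int
  | [] => 1
  | c :: rest => ((pd.get? c).bind (fun p => pvLook2 td p c)).getD 0 * pvProd td pd rest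

-- A's second loop computes (a * pvProd l, c) from the path l that starts at c
theorem pv_foldl_path (td : PySem.Dict String (PySem.Dict String Int)) (pd : PySem.Dict String String) :
    ∀ (fuel : Nat) (c : String) (l : List String) (a : Int),
      pvBuildPath pd fuel c = some l →
      l.reverse.foldl (fun (s : Int × String) p => (s.1 * (pvLook2 td s.2 p).getD 0, p)) (a, "START_BTC")
        = (a * pvProd td pd l, c) := by
  intro fuel
  induction fuel with
  | zero => intro c l a h; simp [pvBuildPath] at h
  | succ fuel ih =>
    intro c l a h
    by_cases hc : c == "START_BTC"
    · simp [pvBuildPath, hc] at h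
      subst h
      simp [pvProd, eq_of_beq hc]
    · simp only [pvBuildPath, hc, Bool.false_eq_true, if_false] at h
      cases hn : pd.get? c with
      | none => rw [hn] at h; simp at h
      | some n =>
        rw [hn] at h
        cases hr : pvBuildPath pd fuel n with
        | none => simp [hr] at h
        | some rest =>
          simp only [hr, Option.map_some, Option.some.injEq] at h
          subst h
          rw [List.reverse_cons, List.foldl_append, ih n rest a hr]
          simp [pvProd, hn]
          ring

-- B's walk succeeds under pvChainOk, A's path exists, and B returns coins * pvProd of that path
theorem pv_walk_eq (td : PySem.Dict String (PySem.Dict String Int)) (pd : PySem.Dict String String) :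
    ∀ (fuel : Nat) (c : String),
      pvChainOk td pd fuel c = true →
      ∃ l, pvBuildPath pd fuel c = some l ∧
        ∀ coins : Int, pvWalkBack td pd fuel c coins = some (coins * pvProd td pd l) := by
  intro fuel
  induction fuel with
  | zero => intro c h; simp [pvChainOk] at h
  | succ fuel ih =>
    intro c h
    by_cases hc : c == "START_BTC"
    · refine ⟨[], ?_, ?_⟩
      · simp [pvBuildPath, hc]
      · intro coins; simp [pvWalkBack, hc, pvProd]
    · simp only [pvChainOk, hc, Bool.false_or] at h
      cases hn : pd.get? c with
      | none => rw [hn] at h; simp at h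
      | some n =>
        rw [hn] at h
        simp only [Bool.and_eq_true, Option.isSome_iff_exists] at h
        obtain ⟨⟨w, hw⟩, hok⟩ := h
        obtain ⟨rest, hbuild, hwalk⟩ := ih n hok
        refine ⟨c :: rest, ?_, ?_⟩
        · simp [pvBuildPath, hc, hn, hbuild]
        · intro coins
          simp only [pvWalkBack, hc, Bool.false_eq_true, if_false, hn, hw, hwalk]
          simp [pvProd, hn, hw]
          ring

-- ===== VERDICT =====
theorem get_btcs_spec : Claim_equal_get_btcs := by
  intro transactions prev _ hpre
  unfold Spec_get_btcs get_btcs get_btcs_alt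
  by_cases hm : (pvPd prev).contains "END_BTC"
  · simp only [hm, Bool.not_true, Bool.false_eq_true, if_false]
    obtain ⟨l, hbuild, hwalk⟩ := pv_walk_eq (pvTd transactions) (pvPd prev) (prev.length + 1) "END_BTC" (hpre hm)
    rw [hbuild, hwalk 1]
    simp only [pv_foldl_path (pvTd transactions) (pvPd prev) (prev.length + 1) "END_BTC" l 1 hbuild]
  · simp [hm]
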